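-- pv_equiv track=rewrite | github.com/lulojrz/guia7-testing-python | guia7.py | iguales_consecutivos
-- ===== SOURCE A (Python) =====
-- def  iguales_consecutivos(x:list[int])-> bool:
--     afirmacion = False
--     contador = 1
--     if x  and (len(x)>= 3):
--        for i in range (1,len(x)):
--            if x[i] == x[i-1]:
--                contador+=1
--
--        if contador ==3 :
--           afirmacion = True
--
--
--     return afirmacion
-- ===== SOURCE B (Python) =====
-- def iguales_consecutivos(x: list[int]) -> bool:
--     # Collapse x into maximal runs of equal values (groupby-style skip loop);
--     # the number of equal adjacent pairs is len(x) - number_of_runs.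
--     if len(x) < 3:
--         return False
--     n = len(x)
--     runs = 0
--     i = 0
--     while i < n:
--         v = x[i]
--         while i < n and x[i] == v:
--             i += 1
--         runs += 1
--     return n - runs == 2
-- ===== Notes on version B (the rewrite author's own statement) =====
-- stated objective: alternative
-- what changed: B does not count matching neighbours: it skips over maximal runs of equal values (groupby-style) and uses the identity #equal-adjacent-pairs = len(x) - #runs, returning len(x) - runs == 2.
import Mathlib
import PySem

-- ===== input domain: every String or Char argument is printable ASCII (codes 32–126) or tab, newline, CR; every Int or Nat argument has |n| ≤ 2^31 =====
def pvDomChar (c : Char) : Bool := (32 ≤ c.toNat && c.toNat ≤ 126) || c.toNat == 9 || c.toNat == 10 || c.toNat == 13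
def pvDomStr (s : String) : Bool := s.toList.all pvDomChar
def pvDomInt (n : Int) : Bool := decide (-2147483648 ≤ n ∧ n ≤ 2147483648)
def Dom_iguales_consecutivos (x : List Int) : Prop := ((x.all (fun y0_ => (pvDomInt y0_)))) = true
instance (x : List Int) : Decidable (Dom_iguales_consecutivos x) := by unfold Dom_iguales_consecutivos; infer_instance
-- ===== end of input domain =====

-- B replaces A's neighbour-comparison count with a groupby-style run-skipping loop,
-- using the identity #equal-adjacent-pairs = len(x) - #runs (alternative decomposition, same cost).


-- ===== PORT A =====
-- literal transliteration: contador starts at 1, for i in range(1, len(x)) compare x[i] with x[i-1]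
def iguales_consecutivos (x : List Int) : Bool :=
  let afirmacion := false
  let contador : Int := 1
  if x ≠ [] ∧ (x.length : Int) ≥ 3 then
    let contador :=
      (PySem.List.pyRange 1 (x.length : Int) 1).foldl
        (fun c i =>
          if PySem.List.pyGetD x i 0 = PySem.List.pyGetD x (i - 1) 0 then c + 1 else c)
        contador
    if contador = 3 then true else afirmacion
  else afirmacion

-- ===== PORT B =====
-- B-side helper: number of maximal runs of equal values (the inner while loop = dropWhile)
def pvRuns : List Int → Nat
  | [] => 0
  | a :: rest => pvRuns (rest.dropWhile (· == a)) + 1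
termination_by l => l.length
decreasing_by
  simpa using Nat.lt_succ_of_le (List.length_dropWhile_le (· == a) rest)

def iguales_consecutivos_alt (x : List Int) : Bool :=
  if x.length < 3 then false
  else decide ((x.length : Int) - (pvRuns x : Int) = 2)

-- ===== PRECONDITION & SPEC =====
def Spec_iguales_consecutivos (x : List Int) (out : Bool) : Prop := out = iguales_consecutivos_alt x
instance (x : List Int) (out : Bool) : Decidable (Spec_iguales_consecutivos x out) := by unfold Spec_iguales_consecutivos; infer_instance

-- ===== CLAIM (what is proved, stated in full; the proofs are below) =====
def Claim_equal_iguales_consecutivos : Prop := ∀ (x : List Int), Dom_iguales_consecutivos x → Spec_iguales_consecutivos x (iguales_consecutivos x)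

-- ===== LEMMAS AND PROOFS =====

-- number of equal adjacent pairs
def pvPairs : List Int → Nat
  | [] => 0
  | [_] => 0
  | a :: b :: t => (if a = b then 1 else 0) + pvPairs (b :: t)

lemma pvPairs_junction (a : Int) (d : List Int) (h : d = [] ∨ ∃ b d', d = b :: d' ∧ b ≠ a) :
    pvPairs (a :: d) = pvPairs d := by
  rcases h with h | ⟨b, d', rfl, hne⟩
  · subst h; rfl
  · simp [pvPairs, Ne.symm hne]

lemma pvPairs_run (w : List Int) (a : Int) (d : List Int) (hw : ∀ y ∈ w, y = a) :
    pvPairs (a :: (w ++ d)) = w.length + pvPairs (a :: d) := by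
  induction w generalizing a with
  | nil => simp
  | cons y w' ih =>
    have hy : y = a := hw y (by simp)
    subst hy
    have := ih y (fun z hz => hw z (by simp [hz]))
    simp [pvPairs, this]
    omega

lemma dropWhile_head_ne (p : Int → Bool) (l : List Int) :
    l.dropWhile p = [] ∨ ∃ b d', l.dropWhile p = b :: d' ∧ p b = false := by
  induction l with
  | nil => left; rfl
  | cons y t ih =>
    by_cases h : p y
    · simpa [List.dropWhile, h] using ih
    · right; exact ⟨y, t, by simp [List.dropWhile, h], by simp [h]⟩

lemma len_eq_runs_add_pairs (x : List Int) : x.length = pvRuns x + pvPairs x := by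
  induction x using pvRuns.induct with
  | case1 => simp [pvRuns, pvPairs]
  | case2 a rest ih =>
    have hsplit : rest = rest.takeWhile (· == a) ++ rest.dropWhile (· == a) :=
      (List.takeWhile_append_dropWhile).symm
    have hw : ∀ y ∈ rest.takeWhile (· == a), y = a := by
      intro y hy
      simpa using List.mem_takeWhile_imp hy
    have hd := dropWhile_head_ne (· == a) rest
    have hjun : pvPairs (a :: rest.dropWhile (· == a)) = pvPairs (rest.dropWhile (· == a)) := by
      apply pvPairs_junction
      rcases hd with h | ⟨b, d', he, hb⟩
      · exact Or.inl h
      · exact Or.inr ⟨b, d', he, by simpa using hb⟩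
    have hpairs : pvPairs (a :: rest) =
        (rest.takeWhile (· == a)).length + pvPairs (rest.dropWhile (· == a)) := by
      conv_lhs => rw [hsplit]
      rw [pvPairs_run _ a _ hw, hjun]
    have hlen : rest.length =
        (rest.takeWhile (· == a)).length + (rest.dropWhile (· == a)).length := by
      nth_rewrite 1 [hsplit]
      rw [List.length_append]
    simp only [pvRuns, hpairs, List.length_cons]
    omega

lemma pyGetD_cons_pos (a : Int) (l : List Int) (i : Int) (hi : 1 ≤ i) :
    PySem.List.pyGetD (a :: l) i 0 = PySem.List.pyGetD l (i - 1) 0 := by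
  have h0 : 0 ≤ i := by omega
  have h1 : 0 ≤ i - 1 := by omega
  rw [PySem.List.pyGetD_of_nonneg _ _ h0, PySem.List.pyGetD_of_nonneg _ _ h1]
  have h : i.toNat = (i - 1).toNat + 1 := by omega
  rw [h, List.getD_cons_succ]

lemma pyRange_shift (a b : Int) :
    PySem.List.pyRange (a + 1) (b + 1) 1 = (PySem.List.pyRange a b 1).map (· + 1) := by
  rw [PySem.List.pyRange_one, PySem.List.pyRange_one]
  have : (b + 1 - (a + 1)) = b - a := by ring
  rw [this, List.map_map]
  apply List.map_congr_left
  intro k _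
  simp; ring

lemma foldl_counts_pairs (a : Int) (xs : List Int) (c : Int) :
    (PySem.List.pyRange 1 ((a :: xs).length : Int) 1).foldl
      (fun c i =>
        if PySem.List.pyGetD (a :: xs) i 0 = PySem.List.pyGetD (a :: xs) (i - 1) 0 then c + 1 else c)
      c = c + (pvPairs (a :: xs) : Int) := by
  induction xs generalizing a c with
  | nil =>
    rw [PySem.List.pyRange_one_eq_nil (by simp)]
    simp [pvPairs]
  | cons b t ih =>
    have hlen : ((a :: b :: t).length : Int) = ((b :: t).length : Int) + 1 := by
      simp only [List.length_cons]
      push_cast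
      ring
    have hcons : PySem.List.pyRange 1 ((a :: b :: t).length : Int) 1 =
        1 :: PySem.List.pyRange 2 ((a :: b :: t).length : Int) 1 := by
      apply PySem.List.pyRange_one_cons
      have : (0:Int) < ((b :: t).length : Int) := by exact_mod_cast Nat.succ_pos t.length
      omega
    rw [hcons]
    simp only [List.foldl_cons]
    have hstep : (if PySem.List.pyGetD (a :: b :: t) 1 0 =
        PySem.List.pyGetD (a :: b :: t) (1 - 1) 0 then c + 1 else c) =
        c + (if a = b then (1:Int) else 0) := by
      have h1 : PySem.List.pyGetD (a :: b :: t) 1 0 = b := by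
        rw [PySem.List.pyGetD_of_nonneg _ _ (by norm_num : (0:Int) ≤ 1)]; rfl
      have h0 : PySem.List.pyGetD (a :: b :: t) 0 0 = a := by
        rw [PySem.List.pyGetD_of_nonneg _ _ (le_refl (0:Int))]; rfl
      norm_num [h1, h0]
      by_cases h : a = b
      · simp [h]
      · simp [h, Ne.symm h]
    rw [hstep]
    have hshift : PySem.List.pyRange 2 ((a :: b :: t).length : Int) 1 =
        (PySem.List.pyRange 1 ((b :: t).length : Int) 1).map (· + 1) := by
      have : (2:Int) = 1 + 1 := by norm_num
      rw [this, hlen, pyRange_shift]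
    rw [hshift, List.foldl_map]
    have hbody : ∀ (c' : Int), ∀ i ∈ PySem.List.pyRange 1 ((b :: t).length : Int) 1,
        (if PySem.List.pyGetD (a :: b :: t) (i + 1) 0 =
            PySem.List.pyGetD (a :: b :: t) (i + 1 - 1) 0 then c' + 1 else c') =
        (if PySem.List.pyGetD (b :: t) i 0 =
            PySem.List.pyGetD (b :: t) (i - 1) 0 then c' + 1 else c') := by
      intro c' i hi
      have hi1 : 1 ≤ i := ((PySem.List.mem_pyRange_one).1 hi).1
      have e1 : PySem.List.pyGetD (a :: b :: t) (i + 1) 0 = PySem.List.pyGetD (b :: t) i 0 := by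
        have := pyGetD_cons_pos a (b :: t) (i + 1) (by omega)
        simpa using this
      have e2 : PySem.List.pyGetD (a :: b :: t) (i + 1 - 1) 0 =
          PySem.List.pyGetD (b :: t) (i - 1) 0 := by
        have h : i + 1 - 1 = (i - 1) + 1 := by ring
        rw [h]
        have := pyGetD_cons_pos a (b :: t) ((i - 1) + 1) (by omega)
        simpa using this
      rw [e1, e2]
    rw [PySem.List.foldl_congr_mem _ _ _ _ hbody, ih]
    have : pvPairs (a :: b :: t) = (if a = b then 1 else 0) + pvPairs (b :: t) := rfl
    rw [this]
    by_cases h : a = b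
    · simp [h]
      ring
    · simp [h]

-- ===== VERDICT (by name: the statement is the Claim_ definition above) =====
theorem iguales_consecutivos_spec : Claim_equal_iguales_consecutivos := by
  intro x _
  unfold Spec_iguales_consecutivos iguales_consecutivos iguales_consecutivos_alt
  by_cases h3 : x.length < 3
  · have : ¬ (x ≠ [] ∧ (x.length : Int) ≥ 3) := by
      rintro ⟨-, hge⟩
      omega
    rw [if_neg this, if_pos h3]
  · have hne : x ≠ [] := by
      intro he; subst he; simp at h3
    have hge : (x.length : Int) ≥ 3 := by omega
    cases x with
    | nil => exact absurd rfl hne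
    | cons a xs =>
      rw [if_pos ⟨by simp, hge⟩, if_neg h3]
      rw [foldl_counts_pairs]
      have hkey := len_eq_runs_add_pairs (a :: xs)
      have hcast : (((a :: xs).length : Int)) = (pvRuns (a :: xs) : Int) + (pvPairs (a :: xs) : Int) := by
        exact_mod_cast congrArg (Nat.cast : Nat → Int) hkey
      by_cases hp : (1 : Int) + (pvPairs (a :: xs) : Int) = 3
      · rw [if_pos hp]
        symm
        simp only [decide_eq_true_iff]
        omega
      · rw [if_neg hp]
        symm
        simp only [decide_eq_false_iff_not]
        omega
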